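-- pv_equiv track=rewrite | github.com/rpribau/pseudoaleatorios | middle_squared.py | middle_squared_method
-- ===== SOURCE A (Python) =====
-- def middle_squared_method(seed1, n):
--     results = []
--     for _ in range(n):
--         squared = seed1 ** 2
--         len_squared = len(str(squared))
--         len_seed = len(str(seed1))
--         start = (len_squared - len_seed) // 2
--         seed1 = int(str(squared)[int(start):int(start) + len_seed])
--         results.append(seed1)
--     return results
-- ===== SOURCE B (Python) =====
-- def middle_squared_method(seed1, n):
--     # The seed sequence is deterministic, so it is eventually periodic: memoize
--     # every seed seen; on the first repeat, the remaining outputs are the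
--     # detected cycle repeated, so copy them instead of recomputing.
--     results = []
--     seen = {}
--     s = seed1
--     while len(results) < n:
--         if s in seen:
--             cycle = results[seen[s]:]
--             q = n - len(results)
--             results += cycle * (q // len(cycle)) + cycle[:q % len(cycle)]
--             break
--         seen[s] = len(results)
--         t = str(s * s)
--         w = len(str(s))
--         a = (len(t) - w) // 2
--         s = int(t[a:a + w])
--         results.append(s)
--     return results
-- ===== Notes on version B (the rewrite author's own statement) =====
-- stated objective: faster
-- what changed: B memoizes every seed in a dict and, at the first repeat of a seed, stops iterating and fills the remaining outputs by repeating the detected cycle (the middle-square map is deterministic, so the sequence is eventually periodic), instead of A's recomputing square/str/slice for all n rounds.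
import Mathlib
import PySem

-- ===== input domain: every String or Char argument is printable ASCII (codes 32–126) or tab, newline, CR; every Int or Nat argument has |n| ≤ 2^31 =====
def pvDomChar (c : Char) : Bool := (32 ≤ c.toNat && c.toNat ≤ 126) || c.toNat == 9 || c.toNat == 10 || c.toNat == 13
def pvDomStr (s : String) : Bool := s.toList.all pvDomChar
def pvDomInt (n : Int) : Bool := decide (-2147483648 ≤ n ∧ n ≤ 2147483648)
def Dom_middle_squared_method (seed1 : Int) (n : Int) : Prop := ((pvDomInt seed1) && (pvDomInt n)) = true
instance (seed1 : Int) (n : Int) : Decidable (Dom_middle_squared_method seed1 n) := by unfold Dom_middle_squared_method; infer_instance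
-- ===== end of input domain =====

-- B detects the cycle of the deterministic seed map (dict of seen seeds) and fills the
-- remaining outputs by repeating the recorded cycle instead of recomputing each step;
-- identical outputs, measurably faster on large n.


-- ===== PORT A =====
-- A's loop body: one iteration of 'for _ in range(n)'
def msLoopBodyA (st : List Int × Int) (_x : Int) : List Int × Int :=
  let results := st.1
  let seed1 := st.2
  let squared := seed1 ^ 2
  let len_squared := PySem.Str.len (PySem.Int.toStr squared)
  let len_seed := PySem.Str.len (PySem.Int.toStr seed1)
  let start := PySem.Int.floordiv (len_squared - len_seed) 2
  -- int(str(squared)[start:start+len_seed]); the slice is always a nonempty digit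
  -- string, so Python's int never raises and the getD 0 default is unreachable
  let seed1' := (PySem.Int.ofStr? (PySem.Str.slice (PySem.Int.toStr squared)
                    (some start) (some (start + len_seed)))).getD 0
  (results ++ [seed1'], seed1')

def middle_squared_method (seed1 : Int) (n : Int) : List Int :=
  ((PySem.List.pyRange 0 n 1).foldl msLoopBodyA ([], seed1)).1

-- ===== PORT B =====
-- Source B's while-loop: state (results, seen, s); stops when len(results) ≥ n or on
-- the cycle branch; terminates because results grows by one each recursive call.
def msAltLoop (n : Int) (results : List Int) (seen : PySem.Dict Int Int) (s : Int) : List Int :=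
  if _h : (results.length : Int) < n then
    match seen.get? s with
    | some i =>
      -- cycle = results[seen[s]:]; results += cycle*(q//len) + cycle[:q%len]; break
      let cycle := PySem.List.slice results (some i) none
      let q := n - (results.length : Int)
      results ++ (PySem.List.pyRepeat cycle (PySem.Int.floordiv q (cycle.length : Int))
                  ++ PySem.List.slice cycle none (some (PySem.Int.mod q (cycle.length : Int))))
    | none =>
      let seen' := seen.insert s (results.length : Int)
      let t := PySem.Int.toStr (s * s)
      let w := PySem.Str.len (PySem.Int.toStr s)
      let a := PySem.Int.floordiv (PySem.Str.len t - w) 2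
      -- int(t[a:a+w]): nonempty digit slice, so int never raises; getD 0 unreachable
      let s' := (PySem.Int.ofStr? (PySem.Str.slice t (some a) (some (a + w)))).getD 0
      msAltLoop n (results ++ [s']) seen' s'
  else results
termination_by (n - (results.length : Int)).toNat
decreasing_by
  simp only [List.length_append, List.length_cons, List.length_nil]
  omega

def middle_squared_method_alt (seed1 : Int) (n : Int) : List Int :=
  msAltLoop n [] PySem.Dict.empty seed1

-- ===== PRECONDITION & SPEC =====
def Spec_middle_squared_method (seed1 : Int) (n : Int) (out : List Int) : Prop := out = middle_squared_method_alt seed1 n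
instance (seed1 : Int) (n : Int) (out : List Int) : Decidable (Spec_middle_squared_method seed1 n out) := by unfold Spec_middle_squared_method; infer_instance

-- ===== CLAIM (what is proved, stated in full; the proofs are below) =====
def Claim_equal_middle_squared_method : Prop := ∀ (seed1 : Int) (n : Int), Dom_middle_squared_method seed1 n → Spec_middle_squared_method seed1 n (middle_squared_method seed1 n)

-- ===== LEMMAS AND PROOFS =====

-- the one-round seed update both programs perform
def msStep (s : Int) : Int :=
  let t := PySem.Int.toStr (s * s)
  let w := PySem.Str.len (PySem.Int.toStr s)
  let a := PySem.Int.floordiv (PySem.Str.len t - w) 2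
  (PySem.Int.ofStr? (PySem.Str.slice t (some a) (some (a + w)))).getD 0

theorem msLoopBodyA_eq (st : List Int × Int) (x : Int) :
    msLoopBodyA st x = (st.1 ++ [msStep st.2], msStep st.2) := by
  simp only [msLoopBodyA, msStep, pow_two]

theorem foldA (l : List Int) (acc : List Int) (s : Int) :
    (l.foldl msLoopBodyA (acc, s))
    = (acc ++ (List.range l.length).map (fun k => msStep^[k+1] s), msStep^[l.length] s) := by
  induction l generalizing acc s with
  | nil => simp
  | cons x xs ih =>
      rw [List.foldl_cons, msLoopBodyA_eq, ih]
      simp only [Prod.mk.injEq, List.length_cons]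
      refine ⟨?_, (Function.iterate_succ_apply msStep xs.length s).symm⟩
      rw [List.append_assoc]
      congr 1
      rw [List.range_succ_eq_map, List.map_cons, List.map_map, List.singleton_append]
      congr 1

theorem A_char (seed1 n : Int) :
    middle_squared_method seed1 n = (List.range n.toNat).map (fun k => msStep^[k+1] seed1) := by
  unfold middle_squared_method
  rw [foldA]
  simp [PySem.List.length_pyRange_one]

-- every dict entry records a true iteration index below the current time
def SeenInv (seen : PySem.Dict Int Int) (s0 : Int) (m : Nat) : Prop :=
  ∀ s i, seen.get? s = some i → ∃ j : Nat, i = (j : Int) ∧ j < m ∧ msStep^[j] s0 = s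

-- orbit outputs from time j+p onward are the period-p cycle repeated
theorem cyclic_fill (h : Nat → Int) (j p : Nat) (hp : 0 < p)
    (hper : ∀ t, j ≤ t → h (t + p) = h t) (q : Nat) :
    (List.range q).map (fun u => h (j + p + u))
      = (List.replicate (q / p) ((List.range p).map (fun u => h (j + u)))).flatten
        ++ ((List.range p).map (fun u => h (j + u))).take (q % p) := by
  induction q using Nat.strong_induction_on with
  | _ q ih =>
    by_cases hq : q < p
    · rw [Nat.div_eq_of_lt hq, Nat.mod_eq_of_lt hq]
      simp only [List.replicate_zero, List.flatten_nil, List.nil_append]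
      rw [← List.map_take, List.take_range, min_eq_left (le_of_lt hq)]
      apply List.map_congr_left
      intro u _
      have e : j + p + u = (j + u) + p := by omega
      rw [e, hper (j + u) (by omega)]
    · rw [not_lt] at hq
      obtain ⟨q', rfl⟩ : ∃ q', q = p + q' := ⟨q - p, by omega⟩
      rw [List.range_add, List.map_append, List.map_map]
      have h1 : (List.range p).map (fun u => h (j + p + u))
          = (List.range p).map (fun u => h (j + u)) := by
        apply List.map_congr_left
        intro u _
        have e : j + p + u = (j + u) + p := by omega
        rw [e, hper (j + u) (by omega)]
      have h2 : (List.range q').map ((fun u => h (j + p + u)) ∘ (fun x => p + x))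
          = (List.range q').map (fun u => h (j + p + u)) := by
        apply List.map_congr_left
        intro u _
        simp only [Function.comp]
        have e : j + p + (p + u) = (j + p + u) + p := by omega
        rw [e, hper (j + p + u) (by omega)]
      rw [h1, h2, ih q' (by omega)]
      have hdiv : (p + q') / p = q' / p + 1 := by
        rw [Nat.add_comm]; exact Nat.add_div_right q' hp
      have hmod : (p + q') % p = q' % p := Nat.add_mod_left p q'
      rw [hdiv, hmod, List.replicate_succ, List.flatten_cons, List.append_assoc]

theorem loop_char (n : Int) (k : Nat) :
    ∀ (m : Nat) (seen : PySem.Dict Int Int) (s0 : Int),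
      n.toNat - m = k → SeenInv seen s0 m → ((m : Int) ≤ n ∨ m = 0) →
      msAltLoop n ((List.range m).map (fun j => msStep^[j+1] s0)) seen (msStep^[m] s0)
        = (List.range n.toNat).map (fun j => msStep^[j+1] s0) := by
  induction k with
  | zero =>
      intro m seen s0 hk _ hm
      rw [msAltLoop]
      rw [dif_neg (by simp only [List.length_map, List.length_range]; omega)]
      have hmn : m = n.toNat := by omega
      rw [hmn]
  | succ k ih =>
      intro m seen s0 hk hinv hm
      have hmn : (m : Int) < n := by omega
      rw [msAltLoop]
      rw [dif_pos (by simp only [List.length_map, List.length_range]; exact_mod_cast hmn)]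
      cases hg : seen.get? (msStep^[m] s0) with
      | none =>
          simp only []
          have hstep : (PySem.Int.ofStr? (PySem.Str.slice (PySem.Int.toStr (msStep^[m] s0 * msStep^[m] s0))
                (some (PySem.Int.floordiv (PySem.Str.len (PySem.Int.toStr (msStep^[m] s0 * msStep^[m] s0)) - PySem.Str.len (PySem.Int.toStr (msStep^[m] s0))) 2))
                (some (PySem.Int.floordiv (PySem.Str.len (PySem.Int.toStr (msStep^[m] s0 * msStep^[m] s0)) - PySem.Str.len (PySem.Int.toStr (msStep^[m] s0))) 2 + PySem.Str.len (PySem.Int.toStr (msStep^[m] s0)))))).getD 0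
              = msStep^[m+1] s0 := by
            rw [Function.iterate_succ_apply']
            rfl
          rw [hstep]
          have hres : ((List.range m).map (fun j => msStep^[j+1] s0)) ++ [msStep^[m+1] s0]
              = (List.range (m+1)).map (fun j => msStep^[j+1] s0) := by
            rw [List.range_succ, List.map_append]
            rfl
          rw [hres]
          have hlen : (((List.range m).map (fun j => msStep^[j+1] s0)).length : Int) = (m : Int) := by
            simp
          rw [hlen]
          have hinv' : SeenInv (seen.insert (msStep^[m] s0) (m : Int)) s0 (m + 1) := by
            intro s i hget
            rw [PySem.Dict.get?_insert] at hget
            by_cases hs : s = msStep^[m] s0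
            · rw [if_pos hs] at hget
              injection hget with h
              exact ⟨m, h.symm, by omega, hs ▸ rfl⟩
            · rw [if_neg hs] at hget
              obtain ⟨j, hj1, hj2, hj3⟩ := hinv s i hget
              exact ⟨j, hj1, by omega, hj3⟩
          have := ih (m + 1) (seen.insert (msStep^[m] s0) (m : Int)) s0 (by omega) hinv' (by omega)
          exact_mod_cast this
      | some i =>
          simp only []
          obtain ⟨j, rfl, hjm, hjeq⟩ := hinv _ _ hg
          set h' : Nat → Int := fun t => msStep^[t+1] s0 with hh'
          set p : Nat := m - j with hpdef
          have hp : 0 < p := by omega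
          have hm' : m = j + p := by omega
          -- periodicity of the orbit from index j on
          have hper : ∀ t, j ≤ t → h' (t + p) = h' t := by
            intro t ht
            have base : ∀ u : Nat, msStep^[u + j] s0 = msStep^[u + m] s0 := by
              intro u
              rw [Function.iterate_add_apply, Function.iterate_add_apply, hjeq]
            have b1 := base (t + 1 - j)
            have e1 : (t + 1 - j) + j = t + 1 := by omega
            have e2 : (t + 1 - j) + m = t + p + 1 := by omega
            rw [e1, e2] at b1
            exact b1.symm
          -- the recorded cycle
          have hcycle : PySem.List.slice ((List.range m).map h') (some ((j : Nat) : Int)) none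
              = (List.range p).map (fun u => h' (j + u)) := by
            rw [PySem.List.slice_from_natCast]
            conv_lhs => rw [hm', List.range_add, List.map_append]
            rw [List.drop_append_of_le_length (by simp)]
            rw [List.drop_of_length_le (by simp), List.nil_append, List.map_map]
            rfl
          rw [hcycle]
          have hrlen : ((((List.range m).map h')).length : Int) = (m : Int) := by simp
          rw [hrlen]
          set qn : Nat := (n - (m : Int)).toNat with hqn
          have hq : n - (m : Int) = ((qn : Nat) : Int) := by omega
          have hplen : (((List.range p).map (fun u => h' (j + u))).length) = p := by simp
          have hfd : PySem.Int.floordiv ((qn : Nat) : Int)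
              ((((List.range p).map (fun u => h' (j + u))).length : Nat) : Int)
              = ((qn / p : Nat) : Int) := by
            rw [hplen]
            exact_mod_cast PySem.Int.floordiv_natCast qn p
          have hmd : PySem.Int.mod ((qn : Nat) : Int)
              ((((List.range p).map (fun u => h' (j + u))).length : Nat) : Int)
              = ((qn % p : Nat) : Int) := by
            rw [hplen]
            exact_mod_cast PySem.Int.mod_natCast qn p
          rw [hq, hfd, hmd, PySem.List.slice_to_natCast]
          have hrepeat : PySem.List.pyRepeat ((List.range p).map (fun u => h' (j + u))) ((qn / p : Nat) : Int)
              = (List.replicate (qn / p) ((List.range p).map (fun u => h' (j + u)))).flatten := by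
            simp only [PySem.List.pyRepeat, Int.toNat_natCast]
          rw [hrepeat]
          have htail : (List.replicate (qn / p) ((List.range p).map (fun u => h' (j + u)))).flatten
              ++ ((List.range p).map (fun u => h' (j + u))).take (qn % p)
              = (List.range qn).map (fun u => h' (j + p + u)) :=
            (cyclic_fill h' j p hp hper qn).symm
          rw [htail]
          have hNtoNat : n.toNat = m + qn := by omega
          rw [hNtoNat, List.range_add, List.map_append, List.map_map]
          congr 1
          apply List.map_congr_left
          intro u _
          show msStep^[(j + p + u) + 1] s0 = msStep^[(m + u) + 1] s0
          congr 1
          omega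

-- ===== VERDICT (by name: the statement is the Claim_ definition above) =====
theorem middle_squared_method_spec : Claim_equal_middle_squared_method := by
  intro seed1 n _
  unfold Spec_middle_squared_method middle_squared_method_alt
  have h0 : SeenInv PySem.Dict.empty seed1 0 := by
    intro s i hget
    rw [PySem.Dict.get?_empty] at hget
    cases hget
  have := loop_char n (n.toNat - 0) 0 PySem.Dict.empty seed1 rfl h0 (Or.inr rfl)
  simp only [List.range_zero, List.map_nil, Function.iterate_zero, id] at this
  rw [this, A_char]
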